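-- pv_equiv track=rewrite | github.com/Simon717/sword-to-offer-python | 2018校招真题/网易 操作序列.py | helper2
-- ===== SOURCE A (Python) =====
-- def helper2(nums):
--     nums = nums[::-1]
--     res = ['*'] * len(nums)
--     N = len(nums)
--     if len(nums) % 2:
--         res[len(nums) // 2] = nums[-1]
--     q = 0
--     for i in range(len(nums)//2):
--         res[i] = nums[q]
--         res[N-1-i] = nums[q+1]
--         q += 2
--     return res
-- ===== SOURCE B (Python) =====
-- def helper2(nums):
--     evens, odds = [], []
--     for i, x in enumerate(reversed(nums)):
--         if i % 2 == 0:
--             evens.append(x)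
--         else:
--             odds.append(x)
--     return evens + odds[::-1]
-- ===== Notes on version B (the rewrite author's own statement) =====
-- stated objective: simpler
-- what changed: Replaces the preallocated result array with symmetric index writes (res[i], res[N-1-i]) and an odd-length middle special-case by a single parity partition of the reversed list into two append-only lists, returned as evens + reversed odds.
import Mathlib
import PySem

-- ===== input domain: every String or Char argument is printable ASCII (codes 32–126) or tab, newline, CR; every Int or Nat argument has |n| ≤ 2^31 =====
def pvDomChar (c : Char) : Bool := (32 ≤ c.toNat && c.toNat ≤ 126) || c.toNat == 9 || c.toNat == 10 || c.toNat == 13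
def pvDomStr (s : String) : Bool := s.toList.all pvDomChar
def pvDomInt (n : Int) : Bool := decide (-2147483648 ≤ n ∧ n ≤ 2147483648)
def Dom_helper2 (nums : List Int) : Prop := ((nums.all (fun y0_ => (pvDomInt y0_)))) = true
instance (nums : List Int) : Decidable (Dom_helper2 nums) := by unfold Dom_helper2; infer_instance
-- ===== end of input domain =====

-- B replaces A's preallocated result array with symmetric index writes and an odd-length
-- middle special-case by a single parity partition of the reversed list into two
-- append-only lists, returned as evens ++ (reverse odds); objective: simpler.

-- ===== PORT A =====
-- Literal transliteration of A. Notes on exactness: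
--  * nums[::-1] is List.reverse (PySem.List.slice?_none_none_neg_one).
--  * res = ['*'] * N preallocates placeholders; in Lean the placeholder is 0 : Int.
--    Every cell that survives to the return value is overwritten (even N: all cells;
--    odd N: the middle cell is written by the `if`), so the placeholder value is unobservable.
--  * nums[q] / nums[q+1] with 0 ≤ q and q+1 < N never raise inside the loop, so
--    List.getD … 0 is exact there; nums[-1] is PySem.List.pyGet? r (-1) (in range: N odd ⇒ r ≠ []).
--  * range(len(nums)//2) over a nonnegative bound is List.range (N / 2).
def helper2 (nums : List Int) : List Int :=
  let r := nums.reverse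
  let N := r.length
  let res0 := List.replicate N (0 : Int)
  let res1 := if N % 2 ≠ 0 then res0.set (N / 2) ((PySem.List.pyGet? r (-1)).getD 0) else res0
  ((List.range (N / 2)).foldl
    (fun (st : List Int × Nat) (i : Nat) =>
      ((st.1.set i (r.getD st.2 0)).set (N - 1 - i) (r.getD (st.2 + 1) 0), st.2 + 2))
    (res1, 0)).1

-- ===== PORT B =====
-- Literal transliteration of Source B: one pass over enumerate(reversed(nums)) appending to
-- two lists by index parity, then evens + odds[::-1] (reverse, slice?_none_none_neg_one).
def helper2_alt (nums : List Int) : List Int :=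
  let r := nums.reverse
  let p := (PySem.List.enumerate r 0).foldl
    (fun (st : List Int × List Int) (ix : Int × Int) =>
      if PySem.Int.mod ix.1 2 = 0 then (st.1 ++ [ix.2], st.2) else (st.1, st.2 ++ [ix.2]))
    ([], [])
  p.1 ++ p.2.reverse

-- ===== PRECONDITION & SPEC =====
def Spec_helper2 (nums : List Int) (out : List Int) : Prop := out = helper2_alt nums
instance (nums : List Int) (out : List Int) : Decidable (Spec_helper2 nums out) := by unfold Spec_helper2; infer_instance

-- ===== CLAIM (what is proved, stated in full; the proofs are below) =====
def Claim_equal_helper2 : Prop := ∀ (nums : List Int), Dom_helper2 nums → Spec_helper2 nums (helper2 nums)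

-- ===== LEMMAS AND PROOFS =====

-- Elements of a list at even / odd positions, in order.
mutual
def pvEvens : List Int → List Int
  | [] => []
  | a :: t => a :: pvOdds t
def pvOdds : List Int → List Int
  | [] => []
  | _ :: t => pvEvens t
end

-- The common value of both programs on the reversed input:
-- pvIlv [r0,r1,r2,r3,…] = [r0, r2, …, …, r3, r1].
def pvIlv : List Int → List Int
  | [] => []
  | [a] => [a]
  | a :: b :: t => a :: (pvIlv t ++ [b])

-- A's result array before the loop runs, as a function of the (remaining) input.
def pvCore (t : List Int) : List Int :=
  if t.length % 2 = 1 then (List.replicate t.length 0).set (t.length / 2) (t.getLastD 0)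
  else List.replicate t.length 0

lemma pvPyGet_neg_one (r : List Int) (h : r ≠ []) : PySem.List.pyGet? r (-1) = r.getLast? := by
  have hl : 1 ≤ r.length := by cases r <;> simp_all
  simp [PySem.List.pyGet?, PySem.List.pyIdx?, hl, List.getLast?_eq_getElem?]

-- B's partition loop, characterised for any starting index.
lemma pvFoldEnum (r : List Int) : ∀ (k : Int) (e o : List Int),
    (PySem.List.enumerate r k).foldl
      (fun (st : List Int × List Int) (ix : Int × Int) =>
        if PySem.Int.mod ix.1 2 = 0 then (st.1 ++ [ix.2], st.2) else (st.1, st.2 ++ [ix.2]))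
      (e, o)
    = if PySem.Int.mod k 2 = 0 then (e ++ pvEvens r, o ++ pvOdds r)
      else (e ++ pvOdds r, o ++ pvEvens r) := by
  induction r with
  | nil => intro k e o; simp [PySem.List.enumerate_nil]; split <;> simp [pvEvens, pvOdds]
  | cons a t ih =>
    intro k e o
    have hm : ∀ m : Int, PySem.Int.mod m 2 = m % 2 := fun m =>
      PySem.Int.mod_eq_emod_of_pos (by omega)
    rw [PySem.List.enumerate_cons]
    simp only [List.foldl_cons]
    by_cases hk : PySem.Int.mod k 2 = 0
    · have hk1 : ¬ PySem.Int.mod (k + 1) 2 = 0 := by rw [hm] at hk ⊢; omega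
      simp only [hk, if_true, ih (k + 1) (e ++ [a]) o, hk1, if_false]
      simp [pvEvens, pvOdds]
    · have hk1 : PySem.Int.mod (k + 1) 2 = 0 := by rw [hm] at hk ⊢; omega
      simp only [if_neg hk, ih (k + 1) e (o ++ [a]), hk1]
      simp [pvEvens, pvOdds]

lemma pvEvensOdds (r : List Int) : pvEvens r ++ (pvOdds r).reverse = pvIlv r := by
  induction r using pvIlv.induct with
  | case1 => simp [pvEvens, pvOdds, pvIlv]
  | case2 a => simp [pvEvens, pvOdds, pvIlv]
  | case3 a b t ih =>
    simp only [pvEvens, pvOdds, pvIlv, List.reverse_cons, List.cons_append,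
      ← List.append_assoc, ih]

lemma pvAlt_eq (nums : List Int) : helper2_alt nums = pvIlv nums.reverse := by
  simp only [helper2_alt]
  rw [pvFoldEnum]
  simp [pvEvensOdds]

lemma pvReplicate2 (n : Nat) :
    List.replicate (n + 2) (0 : Int) = 0 :: (List.replicate n 0 ++ [0]) := by
  rw [List.replicate_succ, List.replicate_succ']

-- One loop iteration of A: writing a at the front and b at the back of the core.
lemma pvCoreStep (x y a b : Int) (t : List Int) :
    ((pvCore (x :: y :: t)).set 0 a).set (t.length + 1) b = a :: (pvCore t ++ [b]) := by
  by_cases hp : t.length % 2 = 1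
  · have hc : pvCore (x :: y :: t)
        = 0 :: ((List.replicate t.length 0).set (t.length / 2) (t.getLastD 0) ++ [0]) := by
      unfold pvCore
      have hlast : (x :: y :: t).getLastD 0 = t.getLastD 0 := by
        cases t with
        | nil => simp at hp
        | cons c u => simp [List.getLastD_eq_getLast?, List.getLast?_cons_cons]
      rw [if_pos (by simp; omega), hlast,
        show (x :: y :: t).length = t.length + 2 by simp,
        show (t.length + 2) / 2 = t.length / 2 + 1 by omega, pvReplicate2,
        List.set_cons_succ,
        List.set_append_left (s := List.replicate t.length (0 : Int)) _ _ (by simp; omega)]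
    rw [hc, List.set_cons_zero, List.set_cons_succ,
      List.set_append_right
        (s := (List.replicate t.length (0 : Int)).set (t.length / 2) (t.getLastD 0)) _ _
        (by simp),
      show t.length -
          ((List.replicate t.length (0 : Int)).set (t.length / 2) (t.getLastD 0)).length = 0
        by simp]
    have hct : pvCore t = (List.replicate t.length 0).set (t.length / 2) (t.getLastD 0) := by
      unfold pvCore; rw [if_pos hp]
    rw [hct]; simp
  · have hc : pvCore (x :: y :: t) = 0 :: (List.replicate t.length 0 ++ [0]) := by
      unfold pvCore
      rw [if_neg (by simp; omega), show (x :: y :: t).length = t.length + 2 by simp,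
        pvReplicate2]
    rw [hc, List.set_cons_zero, List.set_cons_succ,
      List.set_append_right (s := List.replicate t.length (0 : Int)) _ _ (by simp),
      show t.length - (List.replicate t.length (0 : Int)).length = 0 by simp]
    have hct : pvCore t = List.replicate t.length 0 := by unfold pvCore; rw [if_neg hp]
    rw [hct]; simp

-- The loop invariant of A's for-loop: after placing s pairs (prefix e, suffix o),
-- running the remaining k iterations interleaves the rest of r.
lemma pvFoldA (r : List Int) : ∀ (k s : Nat) (e o : List Int),
    e.length = s → o.length = s → 2 * s + 2 * k ≤ r.length → r.length ≤ 2 * s + 2 * k + 1 →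
    ((List.range' s k).foldl
      (fun (st : List Int × Nat) (i : Nat) =>
        ((st.1.set i (r.getD st.2 0)).set (r.length - 1 - i) (r.getD (st.2 + 1) 0), st.2 + 2))
      (e ++ pvCore (r.drop (2 * s)) ++ o, 2 * s)).1
    = e ++ pvIlv (r.drop (2 * s)) ++ o := by
  intro k
  induction k with
  | zero =>
    intro s e o he ho h1 h2
    have ht : (r.drop (2 * s)).length ≤ 1 := by simp; omega
    rcases hd : r.drop (2 * s) with _ | ⟨c, _ | ⟨d, t⟩⟩
    · simp [pvCore, pvIlv]
    · simp [pvCore, pvIlv]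
    · rw [hd] at ht; simp at ht
  | succ k ih =>
    intro s e o he ho h1 h2
    have ht : 2 ≤ (r.drop (2 * s)).length := by simp; omega
    rcases hd : r.drop (2 * s) with _ | ⟨a, _ | ⟨b, t⟩⟩
    · rw [hd] at ht; simp at ht
    · rw [hd] at ht; simp at ht
    · have hrlen : r.length = 2 * s + t.length + 2 := by
        have h := congrArg List.length hd; simp at h; omega
      have hA : r.getD (2 * s) 0 = a := by
        have h0 : (List.drop (2 * s) r)[0]? = r[2 * s + 0]? := List.getElem?_drop
        rw [hd] at h0; simp at h0
        simp [List.getD, ← h0]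
      have hB : r.getD (2 * s + 1) 0 = b := by
        have h0 : (List.drop (2 * s) r)[1]? = r[2 * s + 1]? := List.getElem?_drop
        rw [hd] at h0; simp at h0
        simp [List.getD, ← h0]
      have hd2 : List.drop (2 * (s + 1)) r = t := by
        have hdd : List.drop 2 (List.drop (2 * s) r) = List.drop (2 * s + 2) r :=
          List.drop_drop
        rw [hd] at hdd; simp at hdd
        rw [show 2 * (s + 1) = 2 * s + 2 by omega, ← hdd]
      rw [List.range'_succ, List.foldl_cons]
      dsimp only
      rw [hA, hB]
      have hcl : (pvCore (a :: b :: t)).length = t.length + 2 := by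
        unfold pvCore; split <;> simp
      have hM : ((e ++ pvCore (a :: b :: t) ++ o).set s a).set (r.length - 1 - s) b
          = (e ++ [a]) ++ pvCore t ++ (b :: o) := by
        rw [List.set_append_left (s := e ++ pvCore (a :: b :: t)) _ _ (by simp [hcl]; omega),
          List.set_append_right (s := e) _ _ (by omega),
          show s - e.length = 0 by omega,
          List.set_append_left (s := e ++ (pvCore (a :: b :: t)).set 0 a) _ _
            (by simp [hcl]; omega),
          List.set_append_right (s := e) _ _ (by omega),
          show r.length - 1 - s - e.length = t.length + 1 by omega,
          pvCoreStep]
        simp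
      rw [hM, show 2 * s + 2 = 2 * (s + 1) by omega]
      have IH := ih (s + 1) (e ++ [a]) (b :: o) (by simp [he]) (by simp [ho])
        (by omega) (by omega)
      rw [hd2] at IH
      rw [IH]
      simp [pvIlv]

lemma pvA_eq (nums : List Int) : helper2 nums = pvIlv nums.reverse := by
  simp only [helper2]
  have hinit :
      (if nums.reverse.length % 2 ≠ 0 then
          (List.replicate nums.reverse.length (0 : Int)).set (nums.reverse.length / 2)
            ((PySem.List.pyGet? nums.reverse (-1)).getD 0)
        else List.replicate nums.reverse.length 0)
      = pvCore nums.reverse := by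
    unfold pvCore
    by_cases h : nums.reverse.length % 2 = 1
    · have hne : nums.reverse ≠ [] := by
        intro hnil; rw [hnil] at h; simp at h
      rw [if_pos (by omega), if_pos h, pvPyGet_neg_one _ hne, List.getLastD_eq_getLast?]
    · rw [if_neg (by omega), if_neg h]
  rw [hinit, List.range_eq_range']
  have := pvFoldA nums.reverse (nums.reverse.length / 2) 0 [] [] rfl rfl
    (by omega) (by omega)
  simpa using this

-- ===== VERDICT (by name: the statement is the Claim_ definition above) =====
theorem helper2_spec : Claim_equal_helper2 := by
  intro nums _
  unfold Spec_helper2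
  rw [pvA_eq, pvAlt_eq]
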